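-- pv_equiv track=rewrite | github.com/allenpeng0705/HomeClaw | memory/instructor_patch.py | _ensure_system_first
-- ===== SOURCE A (Python) =====
-- from typing import Any, List, Optional
--
-- DEFAULT_SYSTEM_MESSAGE: str = "You are a helpful assistant. Follow the user's instructions and respond in the requested format."
--
-- def _ensure_system_first(messages: Any) -> List[Any]:
--     """
--     Ensure the first message has role='system' so Instructor's check passes.
--     - Reorder: put all system messages at the top (then user/assistant).
--     - If no system message exists, prepend one with DEFAULT_SYSTEM_MESSAGE.
--     Never raises: on any error returns the original list (or copy) unchanged.
--     """
--     try:
--         if messages is None: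
--             return []
--         if not isinstance(messages, (list, tuple)):
--             return list(messages) if hasattr(messages, "__iter__") and not isinstance(messages, (str, bytes)) else []
--         out: List[Any] = []
--         system_msgs: List[Any] = []
--         for m in messages:
--             try:
--                 if isinstance(m, dict) and (m.get("role") or "").strip().lower() == "system":
--                     system_msgs.append(m)
--                 else:
--                     out.append(m)
--             except Exception:
--                 out.append(m)
--         if system_msgs:
--             return system_msgs + out
--         return [{"role": "system", "content": DEFAULT_SYSTEM_MESSAGE}] + list(out)
--     except Exception:
--         try:
--             return list(messages) if isinstance(messages, (list, tuple)) else []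
--         except Exception:
--             return []
-- ===== SOURCE B (Python) =====
-- from typing import Any, List
--
-- DEFAULT_SYSTEM_MESSAGE: str = "You are a helpful assistant. Follow the user's instructions and respond in the requested format."
--
--
-- def _is_system(m: Any) -> bool:
--     try:
--         if not isinstance(m, dict):
--             return False
--         role = m.get("role")
--         if role is None:
--             return False
--         return role.strip().lower() == "system"
--     except Exception:
--         return False
--
--
-- def _ensure_system_first(messages: Any) -> List[Any]:
--     if messages is None:
--         return []
--     if not isinstance(messages, (list, tuple)):
--         return list(messages) if hasattr(messages, "__iter__") and not isinstance(messages, (str, bytes)) else []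
--     ordered = sorted(messages, key=lambda m: 0 if _is_system(m) else 1)
--     if ordered and _is_system(ordered[0]):
--         return ordered
--     return [{"role": "system", "content": DEFAULT_SYSTEM_MESSAGE}] + ordered
-- ===== Notes on version B (the rewrite author's own statement) =====
-- stated objective: simpler
-- what changed: Replaces the manual two-accumulator partition loop plus emptiness test with a single stable sort keyed 0/1 on is-system followed by a check whether the sorted list's head is a system message (sort stability preserves each group's order); the is-system helper is decomposed as get-then-test instead of the or-default chain.
import Mathlib
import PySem

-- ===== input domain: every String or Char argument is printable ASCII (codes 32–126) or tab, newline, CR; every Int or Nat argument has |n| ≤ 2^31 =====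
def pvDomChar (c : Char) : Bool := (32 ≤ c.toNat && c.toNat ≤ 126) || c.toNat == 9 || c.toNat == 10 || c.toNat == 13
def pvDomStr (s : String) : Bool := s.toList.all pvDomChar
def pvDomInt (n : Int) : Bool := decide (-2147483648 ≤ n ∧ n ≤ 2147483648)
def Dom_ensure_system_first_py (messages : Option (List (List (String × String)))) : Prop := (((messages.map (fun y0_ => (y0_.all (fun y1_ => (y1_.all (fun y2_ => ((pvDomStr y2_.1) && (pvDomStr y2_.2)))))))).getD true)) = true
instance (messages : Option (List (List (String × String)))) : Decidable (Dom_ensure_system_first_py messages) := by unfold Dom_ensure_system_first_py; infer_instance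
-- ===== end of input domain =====

-- ===== PORT A =====
-- B changes: one stable sort keyed 0/1 plus a head-of-result check replaces A's two-accumulator partition loop and any-system test (objective: simpler).
def pvDefaultMsg : List (String × String) :=
  [("role", "system"), ("content", "You are a helpful assistant. Follow the user's instructions and respond in the requested format.")]

-- (m.get("role") or "").strip().lower() == "system"  — first-match assoc lookup; "or ''" only replaces None/"" by "", same as getD ""
def pvRoleIsSystem (m : List (String × String)) : Bool :=
  PySem.Str.lower (PySem.Str.strip (((m.find? (fun p => p.1 == "role")).map (·.2)).getD "")) == "system"

def ensure_system_first_py (messages : Option (List (List (String × String)))) : List (List (String × String)) :=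
  match messages with
  | none => []
  | some ms =>
    -- the for-loop with the two accumulators out / system_msgs (the inner try never fires on dict inputs)
    let p := ms.foldl
      (fun (p : List (List (String × String)) × List (List (String × String))) m =>
        if pvRoleIsSystem m then (p.1, p.2 ++ [m]) else (p.1 ++ [m], p.2))
      ([], [])
    if p.2.isEmpty then pvDefaultMsg :: p.1 else p.2 ++ p.1

-- ===== PORT B =====
-- Source B's _is_system: explicit get-then-test decomposition (role = m.get("role"); None → False; else compare)
def pvIsSysB (m : List (String × String)) : Bool :=
  match (m.find? (fun p => p.1 == "role")).map (·.2) with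
  | none => false
  | some role => PySem.Str.lower (PySem.Str.strip role) == "system"

-- Source B: sort once by key 0/1 (stable), then return the sorted list iff its head is a system message,
-- otherwise prepend the default system message.
def ensure_system_first_py_alt (messages : Option (List (List (String × String)))) : List (List (String × String)) :=
  (messages.map (fun ms =>
    let ordered := PySem.List.sorted ms (fun m => if pvIsSysB m then (0 : Int) else 1) false
    if (ordered.head?.map pvIsSysB).getD false then ordered else pvDefaultMsg :: ordered)).getD []

-- ===== PRECONDITION & SPEC =====
def Spec_ensure_system_first_py (messages : Option (List (List (String × String)))) (out : List (List (String × String))) : Prop := out = ensure_system_first_py_alt messages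
instance (messages : Option (List (List (String × String)))) (out : List (List (String × String))) : Decidable (Spec_ensure_system_first_py messages out) := by unfold Spec_ensure_system_first_py; infer_instance

-- ===== CLAIM (what is proved, stated in full; the proofs are below) =====
def Claim_equal_ensure_system_first_py : Prop := ∀ (messages : Option (List (List (String × String)))), Dom_ensure_system_first_py messages → Spec_ensure_system_first_py messages (ensure_system_first_py messages)

-- ===== LEMMAS AND PROOFS =====
-- the two is-system helpers agree (B skips the strip/lower on a missing key, both then say "not system")
theorem pv_isSys_eq (m : List (String × String)) : pvIsSysB m = pvRoleIsSystem m := by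
  unfold pvIsSysB pvRoleIsSystem
  cases h : (m.find? (fun p => p.1 == "role")).map (·.2) with
  | none => decide
  | some r => rfl

-- A's fold is the partition into (non-system, system)
theorem pv_fold_partition (ms : List (List (String × String)))
    (o s : List (List (String × String))) :
    ms.foldl
      (fun (p : List (List (String × String)) × List (List (String × String))) m =>
        if pvRoleIsSystem m then (p.1, p.2 ++ [m]) else (p.1 ++ [m], p.2))
      (o, s)
    = (o ++ ms.filter (fun m => !pvRoleIsSystem m), s ++ ms.filter pvRoleIsSystem) := by
  induction ms generalizing o s with
  | nil => simp
  | cons m t ih =>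
    by_cases h : pvRoleIsSystem m <;> simp [h, ih]

-- inserting a key-0 element goes right after the key-0 prefix
theorem pv_insertBy_mid (key : List (String × String) → Int) (x : List (String × String))
    (s n : List (List (String × String)))
    (hx : key x = 0) (hs : ∀ y ∈ s, key y = 0) (hn : ∀ y ∈ n, key y = 1) :
    PySem.List.insertBy (fun a b => decide (key a < key b)) x (s ++ n) = s ++ x :: n := by
  induction s with
  | nil =>
    cases n with
    | nil => simp [PySem.List.insertBy]
    | cons y t =>
      have hy : key y = 1 := hn y (by simp)
      simp [PySem.List.insertBy, hx, hy]
  | cons y t ih =>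
    have hy : key y = 0 := hs y (by simp)
    have ih' := ih (fun z hz => hs z (List.mem_cons_of_mem _ hz))
    simp [PySem.List.insertBy, hx, hy, ih']

-- the stable insertion sort by a 0/1 key is the stable partition
theorem pv_sorted_partition (ms : List (List (String × String)))
    (key : List (String × String) → Int) (p : List (String × String) → Bool)
    (hkey : ∀ m, key m = if p m then 0 else 1) :
    PySem.List.sorted ms key false = ms.filter p ++ ms.filter (fun m => !p m) := by
  rw [PySem.List.sorted_eq_foldl_insertBy]
  suffices h : ∀ (l s n : List (List (String × String))),
      (∀ y ∈ s, key y = 0) → (∀ y ∈ n, key y = 1) →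
      l.foldl (fun acc x => PySem.List.insertBy (fun a b => decide (key a < key b)) x acc) (s ++ n)
        = (s ++ l.filter p) ++ (n ++ l.filter (fun m => !p m)) by
    simpa using h ms [] [] (by simp) (by simp)
  intro l
  induction l with
  | nil => intro s n _ _; simp
  | cons x t ih =>
    intro s n hs hn
    by_cases hx : p x
    · have hx0 : key x = 0 := by rw [hkey]; simp [hx]
      have hstep : PySem.List.insertBy (fun a b => decide (key a < key b)) x (s ++ n)
          = (s ++ [x]) ++ n := by
        rw [pv_insertBy_mid key x s n hx0 hs hn]; simp
      have hs' : ∀ y ∈ s ++ [x], key y = 0 := by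
        intro y hy
        rcases List.mem_append.1 hy with h | h
        · exact hs y h
        · simp at h; subst h; exact hx0
      simp only [List.foldl_cons, hstep]
      rw [ih (s ++ [x]) n hs' hn]
      simp [hx]
    · have hx1 : key x = 1 := by rw [hkey]; simp [hx]
      have hstep : PySem.List.insertBy (fun a b => decide (key a < key b)) x (s ++ n)
          = s ++ (n ++ [x]) := by
        have hnb : ∀ y ∈ s ++ n, decide (key x < key y) = false := by
          intro y hy
          rcases List.mem_append.1 hy with h | h
          · have := hs y h; simp [hx1, this]
          · have := hn y h; simp [hx1, this]
        rw [PySem.List.insertBy_of_forall_not_before _ _ _ hnb, List.append_assoc]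
      have hn' : ∀ y ∈ n ++ [x], key y = 1 := by
        intro y hy
        rcases List.mem_append.1 hy with h | h
        · exact hn y h
        · simp at h; subst h; exact hx1
      simp only [List.foldl_cons, hstep]
      rw [ih s (n ++ [x]) hs hn']
      simp [hx]

-- ===== VERDICT (by name: the statement is the Claim_ definition above) =====
theorem ensure_system_first_py_spec : Claim_equal_ensure_system_first_py := by
  intro messages _
  unfold Spec_ensure_system_first_py ensure_system_first_py ensure_system_first_py_alt
  cases messages with
  | none => rfl
  | some ms =>
    simp only [Option.map_some, Option.getD_some, pv_fold_partition ms [] [], List.nil_append]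
    have hBA : ∀ m, pvIsSysB m = pvRoleIsSystem m := pv_isSys_eq
    rw [pv_sorted_partition ms _ pvRoleIsSystem (fun m => by simp [hBA m])]
    cases hsf : ms.filter pvRoleIsSystem with
    | nil =>
      have hall : ∀ a ∈ ms, pvRoleIsSystem a = false := by
        intro a ha
        have := List.filter_eq_nil_iff.1 hsf a ha
        simpa using this
      cases hms : ms with
      | nil => simp
      | cons x t =>
        have hx : pvRoleIsSystem x = false := hall x (by simp [hms])
        simp [hBA, hx]
    | cons x t =>
      have hx : pvRoleIsSystem x = true := by
        have : x ∈ ms.filter pvRoleIsSystem := by simp [hsf]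
        exact (List.mem_filter.1 this).2
      simp [hBA, hx]
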